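-- pv_equiv track=rewrite | github.com/k-harada/AtCoder | ABC/ABC251-300/ABC290/B.py | solve
-- ===== SOURCE A (Python) =====
-- def solve(n, k, s):
--     res = []
--     count = k
--     for c in s:
--         if c == "o" and count > 0:
--             count -= 1
--             res.append("o")
--         else:
--             res.append("x")
--     return "".join(res)
-- ===== SOURCE B (Python) =====
-- def solve(n, k, s):
--     ov = [i for i, c in enumerate(s) if c == "o"]
--     kept = set(ov[:k]) if k > 0 else set()
--     return "".join("o" if i in kept else "x" for i in range(len(s)))
-- ===== Notes on version B (the rewrite author's own statement) =====
-- stated objective: alternative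
-- what changed: Replaces A's single stateful countdown pass with an index-first decomposition: collect the positions of 'o', keep the first k in a set, then rebuild the string positionally.
import Mathlib
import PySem

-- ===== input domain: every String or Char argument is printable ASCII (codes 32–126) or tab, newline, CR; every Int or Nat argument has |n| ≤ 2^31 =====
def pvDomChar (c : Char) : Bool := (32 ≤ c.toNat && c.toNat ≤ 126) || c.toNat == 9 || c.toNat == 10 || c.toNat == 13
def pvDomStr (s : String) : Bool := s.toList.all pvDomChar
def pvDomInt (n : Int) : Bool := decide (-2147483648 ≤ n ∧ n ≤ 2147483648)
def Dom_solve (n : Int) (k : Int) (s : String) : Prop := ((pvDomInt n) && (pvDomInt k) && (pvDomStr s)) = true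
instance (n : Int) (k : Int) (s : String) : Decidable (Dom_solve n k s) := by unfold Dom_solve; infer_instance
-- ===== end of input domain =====

-- B replaces A's stateful countdown pass by an index-first decomposition (positions of 'o',
-- first k kept in a set, string rebuilt positionally); alternative, same cost.

-- ===== PORT A =====
-- A: one pass with a counter, appending "o" or "x".
def solve (n : Int) (k : Int) (s : String) : String :=
  let st := s.toList.foldl
    (fun (acc : List Char × Int) c =>
      if c = 'o' ∧ acc.2 > 0 then (acc.1 ++ ['o'], acc.2 - 1) else (acc.1 ++ ['x'], acc.2))
    ([], k)
  String.mk st.1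

-- ===== PORT B =====
-- B: indices of 'o'; first k of them as a set; rebuild over range(len(s)).
def solve_alt (n : Int) (k : Int) (s : String) : String :=
  let ov : List Int := ((PySem.List.enumerate s.toList 0).filter (fun p => p.2 = 'o')).map (·.1)
  let kept : PySem.Set Int :=
    if k > 0 then PySem.Set.ofList (PySem.List.slice ov none (some k)) else PySem.Set.ofList []
  String.mk ((PySem.List.pyRange 0 s.toList.length 1).map
    (fun i => if PySem.Set.contains kept i then 'o' else 'x'))

-- ===== PRECONDITION & SPEC =====
def Spec_solve (n : Int) (k : Int) (s : String) (out : String) : Prop := out = solve_alt n k s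
instance (n : Int) (k : Int) (s : String) (out : String) : Decidable (Spec_solve n k s out) := by unfold Spec_solve; infer_instance

-- ===== CLAIM (what is proved, stated in full; the proofs are below) =====
def Claim_equal_solve : Prop := ∀ (n : Int) (k : Int) (s : String), Dom_solve n k s → Spec_solve n k s (solve n k s)

-- ===== LEMMAS AND PROOFS =====

-- common recursive description of the per-character output
def pvF : List Char → Int → List Char
  | [], _ => []
  | c :: t, k => if c = 'o' ∧ k > 0 then 'o' :: pvF t (k - 1) else 'x' :: pvF t k

-- indices (from offset j) of the 'o' characters
def pvOIdx : List Char → Int → List Int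
  | [], _ => []
  | c :: t, j => if c = 'o' then j :: pvOIdx t (j + 1) else pvOIdx t (j + 1)

theorem pvF_length (l : List Char) (k : Int) : (pvF l k).length = l.length := by
  induction l generalizing k with
  | nil => rfl
  | cons c t ih => simp only [pvF]; split <;> simp [ih]

theorem pvF_getElem (l : List Char) (k : Int) (i : Nat) (h : i < l.length) :
    (pvF l k)[i]'(by rw [pvF_length]; exact h) =
      if l[i] = 'o' ∧ (((l.take i).countP (· = 'o') : Int) < k) then 'o' else 'x' := by
  induction l generalizing k i with
  | nil => simp at h
  | cons c t ih =>
    cases i with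
    | zero =>
      simp only [pvF, List.take_zero, List.countP_nil, List.getElem_cons_zero, Int.natCast_zero]
      split <;> rename_i hc
      · simp [hc.2]
      · rcases Decidable.em (c = 'o') with h1 | h1
        · have : ¬ (0 : Int) < k := fun hk => hc ⟨h1, hk⟩
          simp [this]
        · simp [h1]
    | succ i' =>
      have hlt : i' < t.length := by simpa using h
      simp only [pvF]
      split <;> rename_i hc
      · simp only [List.getElem_cons_succ, ih (k - 1) i' hlt, List.take_succ_cons,
          List.countP_cons, hc.1, decide_true]
        have heq : (((List.countP (fun x => decide (x = 'o')) (List.take i' t) : Nat) : Int) < k - 1)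
            ↔ (((List.countP (fun x => decide (x = 'o')) (List.take i' t) + 1 : Nat) : Int) < k) := by
          push_cast; omega
        simp [heq]
      · simp only [List.getElem_cons_succ, ih k i' hlt, List.take_succ_cons, List.countP_cons]
        rcases Decidable.em (c = 'o') with h1 | h1
        · have hk : ¬ (0 : Int) < k := fun hk => hc ⟨h1, hk⟩
          have hne : ∀ m : Nat, ¬ ((m : Int) < k) := fun m hm => hk (by omega)
          have e1 : ¬ (t[i'] = 'o' ∧
              ((List.countP (fun x => decide (x = 'o')) (List.take i' t) : Nat) : Int) < k) :=
            fun hx => hne _ hx.2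
          have e2 : ¬ (t[i'] = 'o' ∧
              ((List.countP (fun x => decide (x = 'o')) (List.take i' t) + 1 : Nat) : Int) < k) :=
            fun hx => hne _ hx.2
          simp [h1, e1]
          intro _
          have := hne (List.countP (fun x => decide (x = 'o')) (List.take i' t))
          omega
        · simp [h1]

theorem pvOIdx_ge (l : List Char) (j : Int) : ∀ x ∈ pvOIdx l j, j ≤ x := by
  induction l generalizing j with
  | nil => simp [pvOIdx]
  | cons c t ih =>
    intro x hx
    simp only [pvOIdx] at hx
    split at hx
    · rcases List.mem_cons.mp hx with h | h
      · omega
      · have := ih (j + 1) x h; omega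
    · have := ih (j + 1) x hx; omega

theorem pv_mem_take_oIdx (l : List Char) (i m : Nat) (j : Int) (h : i < l.length) :
    ((j + (i : Int)) ∈ (pvOIdx l j).take m ↔ (l[i] = 'o' ∧ (l.take i).countP (· = 'o') < m)) := by
  induction l generalizing i m j with
  | nil => simp at h
  | cons c t ih =>
    cases i with
    | zero =>
      simp only [Int.natCast_zero, add_zero, List.getElem_cons_zero, List.take_zero,
        List.countP_nil]
      rcases Decidable.em (c = 'o') with h1 | h1
      · simp only [pvOIdx, h1, if_true]
        cases m with
        | zero => simp
        | succ m' =>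
          simp [List.take_succ_cons]
      · simp only [pvOIdx, h1, if_false]
        constructor
        · intro hx
          have := pvOIdx_ge t (j + 1) j (List.mem_of_mem_take hx)
          omega
        · exact fun hx => hx.1.elim
    | succ i' =>
      have hlt : i' < t.length := by simpa using h
      have harith : j + ((i' : Int) + 1) = (j + 1) + (i' : Int) := by ring
      simp only [List.getElem_cons_succ, List.take_succ_cons, List.countP_cons]
      rcases Decidable.em (c = 'o') with h1 | h1
      · simp only [pvOIdx, h1, if_true, decide_true]
        cases m with
        | zero => simp
        | succ m' =>
          simp only [List.take_succ_cons, List.mem_cons]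
          have hne : (j + ((i' : Nat) + 1 : Nat) : Int) ≠ j := by push_cast; omega
          push_cast
          rw [harith]
          rw [ih i' m' (j + 1) hlt]
          constructor
          · intro hx
            rcases hx with hx | hx
            · exact absurd hx (by omega)
            · exact ⟨hx.1, by omega⟩
          · intro hx; right; exact ⟨hx.1, by omega⟩
      · simp only [pvOIdx, h1, if_false, decide_false]
        push_cast
        rw [harith, ih i' m (j + 1) hlt]
        simp

theorem pv_ov_eq (l : List Char) (j : Int) :
    ((PySem.List.enumerate l j).filter (fun p => p.2 = 'o')).map (·.1) = pvOIdx l j := by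
  induction l generalizing j with
  | nil => simp [PySem.List.enumerate_nil, pvOIdx]
  | cons c t ih =>
    rw [PySem.List.enumerate_cons]
    simp only [List.filter_cons, pvOIdx]
    rcases Decidable.em (c = 'o') with h1 | h1 <;> simp [h1, ih]

theorem pv_solve_eq_pvF (n k : Int) (s : String) :
    solve n k s = String.mk (pvF s.toList k) := by
  unfold solve
  suffices h : ∀ (l : List Char) (acc : List Char) (k : Int),
      (l.foldl (fun (acc : List Char × Int) c =>
        if c = 'o' ∧ acc.2 > 0 then (acc.1 ++ ['o'], acc.2 - 1) else (acc.1 ++ ['x'], acc.2))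
        (acc, k)).1 = acc ++ pvF l k by
    simpa using congrArg String.mk (h s.toList [] k)
  intro l
  induction l with
  | nil => intro acc k; simp [pvF]
  | cons c t ih =>
    intro acc k
    simp only [List.foldl_cons, pvF]
    split <;> rename_i hc
    · rw [ih]; simp
    · rw [ih]; simp

-- ===== VERDICT (by name: the statement is the Claim_ definition above) =====
theorem solve_spec : Claim_equal_solve := by
  intro n k s _
  unfold Spec_solve solve_alt
  rw [pv_solve_eq_pvF, pv_ov_eq]
  apply congrArg String.mk
  apply List.ext_getElem
  · simp [pvF_length, PySem.List.length_pyRange_one]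
  · intro i h1 h2
    have hi : i < s.toList.length := by rwa [pvF_length] at h1
    have hr : i < (PySem.List.pyRange 0 (s.toList.length) 1).length := by
      simpa [PySem.List.length_pyRange_one] using hi
    rw [List.getElem_map, PySem.List.getElem_pyRange_one]
    rw [pvF_getElem s.toList k i hi]
    rcases Decidable.em (k > 0) with hk | hk
    · simp only [hk, if_true]
      rw [PySem.List.slice_to (pvOIdx s.toList 0) (by omega : (0:Int) ≤ k)]
      have hcont : PySem.Set.contains (PySem.Set.ofList ((pvOIdx s.toList 0).take k.toNat)) (0 + (i:Int)) =
          decide ((0 + (i:Int)) ∈ (pvOIdx s.toList 0).take k.toNat) := by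
        rcases Decidable.em ((0 + (i:Int)) ∈ (pvOIdx s.toList 0).take k.toNat) with hm | hm
        · simp [hm, PySem.Set.mem_ofList]
        · simp only [hm, decide_false]
          rw [← Bool.not_eq_true]
          intro hcc
          exact hm ((PySem.Set.mem_ofList _ _).mp ((PySem.Set.contains_iff _ _).mp hcc))
      rw [hcont]
      by_cases hcase : s.toList[i] = 'o' ∧ (s.toList.take i).countP (· = 'o') < k.toNat
      · have := (pv_mem_take_oIdx s.toList i k.toNat 0 hi).mpr hcase
        simp only [this, decide_true, if_true]
        have : ((s.toList.take i).countP (· = 'o') : Int) < k := by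
          have := hcase.2; omega
        simp [hcase.1, this]
      · have hnot : ¬ ((0 + (i:Int)) ∈ (pvOIdx s.toList 0).take k.toNat) := by
          intro hm; exact hcase ((pv_mem_take_oIdx s.toList i k.toNat 0 hi).mp hm)
        simp only [hnot, decide_false]
        by_cases h1 : s.toList[i] = 'o'
        · have : ¬ ((s.toList.take i).countP (· = 'o') : Int) < k := by
            intro hlt
            exact hcase ⟨h1, by omega⟩
          simp [this]
        · simp [h1]
    · simp only [hk, if_false]
      have hcond : ¬ (s.toList[i] = 'o' ∧ ((s.toList.take i).countP (· = 'o') : Int) < k) := by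
        rintro ⟨_, hlt⟩
        omega
      simp [PySem.Set.ofList, hcond]
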